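-- pv_equiv track=rewrite | github.com/Tango2503/modern_music_sadder | scripts/genius_get_lyrics.py | spaced_lyrics
-- ===== SOURCE A (Python) =====
-- def spaced_lyrics(lyrics):
--     spaces_to_be_added = []
--     for i in range(len(lyrics) - 1):
--         c1 = lyrics[i]
--         c2 = lyrics[i+1]
--         if c1.islower() and c2.isupper():
--             spaces_to_be_added.append(i)
--         else:
--             continue
--     if len(spaces_to_be_added) > 0:
--         spaced_lyrics = ''
--         for i in range(0, (len(spaces_to_be_added))):
--             if i == 0:
--                 i0 = 0
--             else:
--                 i0 = spaces_to_be_added[i-1] + 1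
--             i1 = spaces_to_be_added[i] + 1
--             part = lyrics[i0:i1]
--             spaced_lyrics += part + ' '
--
--             if i == len(spaces_to_be_added) - 1:
--                 spaced_lyrics += lyrics[i1:]
--         return spaced_lyrics
--     else:
--         return lyrics
-- ===== SOURCE B (Python) =====
-- def spaced_lyrics(lyrics):
--     out = []
--     prev = None
--     for c in lyrics:
--         if prev is not None and prev.islower() and c.isupper():
--             out.append(' ')
--         out.append(c)
--         prev = c
--     return ''.join(out)
-- ===== Notes on version B (the rewrite author's own statement) =====
-- stated objective: simpler
-- what changed: Replaced A's two-phase scheme (collect boundary indices, then reconstruct by slicing segments between consecutive indices) with a single linear pass that carries the previous character and emits a space at each lower-to-upper boundary.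
import Mathlib
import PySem

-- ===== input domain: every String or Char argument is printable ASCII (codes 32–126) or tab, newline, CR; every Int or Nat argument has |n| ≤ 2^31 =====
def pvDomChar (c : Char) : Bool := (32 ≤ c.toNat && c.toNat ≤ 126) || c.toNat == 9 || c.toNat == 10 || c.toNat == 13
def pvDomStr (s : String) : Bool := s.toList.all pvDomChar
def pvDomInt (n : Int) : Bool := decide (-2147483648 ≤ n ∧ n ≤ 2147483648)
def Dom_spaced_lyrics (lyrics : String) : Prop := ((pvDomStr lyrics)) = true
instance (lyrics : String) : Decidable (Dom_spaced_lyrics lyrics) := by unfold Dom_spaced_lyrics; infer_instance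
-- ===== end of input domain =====

-- B replaces A's two-phase scheme (collect boundary indices, then rebuild by slicing the
-- segments between consecutive indices) with one linear pass that remembers the previous
-- character and emits a space at each lowercase-to-uppercase boundary (objective: simpler).

-- ===== PORT A =====
-- first loop: collect the indices i with lyrics[i].islower() and lyrics[i+1].isupper();
-- i and i+1 are always in range, so Python's lyrics[i] is List.getD here (exact).
def spacedA_spaces (cs : List Char) : List Nat :=
  (List.range (cs.length - 1)).foldl
    (fun acc i =>
      let c1 := cs.getD i ' '
      let c2 := cs.getD (i + 1) ' '
      if PySem.Chars.islower c1 && PySem.Chars.isupper c2 then acc ++ [i] else acc) []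

-- second loop: rebuild the string from the slices between consecutive recorded indices;
-- all slice bounds are nonnegative and i0 ≤ i1, so lyrics[i0:i1] is drop/take and
-- lyrics[i1:] is drop (exact for these bounds).
def spacedA_build (cs : List Char) (sp : List Nat) : List Char :=
  (List.range sp.length).foldl
    (fun out i =>
      let i0 := if i = 0 then 0 else sp.getD (i - 1) 0 + 1
      let i1 := sp.getD i 0 + 1
      let part := (cs.drop i0).take (i1 - i0)
      let out := out ++ part ++ [' ']
      if i = sp.length - 1 then out ++ cs.drop i1 else out) []

def spaced_lyrics (lyrics : String) : String :=
  let cs := lyrics.toList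
  let sp := spacedA_spaces cs
  if sp.length > 0 then String.ofList (spacedA_build cs sp) else lyrics

-- ===== PORT B =====
-- one step of B's loop: state = (output so far, previous character if any)
def spacedB_step (st : List Char × Option Char) (c : Char) : List Char × Option Char :=
  let out :=
    match st.2 with
    | some p =>
        if PySem.Chars.islower p && PySem.Chars.isupper c then st.1 ++ [' ', c] else st.1 ++ [c]
    | none => st.1 ++ [c]
  (out, some c)

def spaced_lyrics_alt (lyrics : String) : String :=
  String.ofList (lyrics.toList.foldl spacedB_step ([], none)).1

-- ===== PRECONDITION & SPEC =====
def Spec_spaced_lyrics (lyrics : String) (out : String) : Prop := out = spaced_lyrics_alt lyrics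
instance (lyrics : String) (out : String) : Decidable (Spec_spaced_lyrics lyrics out) := by unfold Spec_spaced_lyrics; infer_instance

-- ===== CLAIM (what is proved, stated in full; the proofs are below) =====
def Claim_equal_spaced_lyrics : Prop := ∀ (lyrics : String), Dom_spaced_lyrics lyrics → Spec_spaced_lyrics lyrics (spaced_lyrics lyrics)

-- ===== LEMMAS AND PROOFS =====

-- boundary test at index i (defaults make it false whenever i+1 is out of range)
def pvBd (cs : List Char) (i : Nat) : Bool :=
  PySem.Chars.islower (cs.getD i ' ') && PySem.Chars.isupper (cs.getD (i + 1) ' ')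

-- B's insertion, expressed structurally: previous character + remaining characters
def pvTail (p : Char) : List Char → List Char
  | [] => []
  | c :: rest =>
      (if PySem.Chars.islower p && PySem.Chars.isupper c then [' ', c] else [c]) ++ pvTail c rest

def pvIns : List Char → List Char
  | [] => []
  | c :: rest => c :: pvTail c rest

-- A's loop body, as a pure function of the index (with generalized first segment start s)
def pvSegS (cs : List Char) (sp : List Nat) (s : Nat) (i : Nat) : List Char :=
  (cs.drop (if i = 0 then s else sp.getD (i - 1) 0 + 1)).take
      (sp.getD i 0 + 1 - (if i = 0 then s else sp.getD (i - 1) 0 + 1))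
    ++ [' '] ++ (if i = sp.length - 1 then cs.drop (sp.getD i 0 + 1) else [])

-- A's reconstruction as structural recursion over the index list
def pvRec (cs : List Char) : Nat → List Nat → List Char
  | s, [] => cs.drop s
  | s, j :: rest => (cs.drop s).take (j + 1 - s) ++ ' ' :: pvRec cs (j + 1) rest

def pvBFrom (cs : List Char) (k : Nat) : List Nat :=
  ((List.range (cs.length - 1)).filter (pvBd cs)).filter (fun j => k ≤ j)

lemma pvFlatMap_congr {α β : Type} (f g : α → List β) (l : List α)
    (h : ∀ x ∈ l, f x = g x) : l.flatMap f = l.flatMap g := by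
  induction l with
  | nil => rfl
  | cons a tl ih =>
      simp only [List.flatMap_cons, h a (by simp), ih fun x hx => h x (by simp [hx])]

lemma pvBd_false_of_ge (cs : List Char) (i : Nat) (h : cs.length ≤ i + 1) :
    pvBd cs i = false := by
  unfold pvBd
  rw [List.getD_eq_default _ _ h]
  simp [PySem.Chars.isupper]

lemma pvBd_lt (cs : List Char) (i : Nat) (h : pvBd cs i = true) : i + 1 < cs.length := by
  by_contra hc
  rw [pvBd_false_of_ge cs i (by omega)] at h
  exact absurd h (by simp)

lemma pvBd_drop (cs : List Char) (k t : Nat) :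
    pvBd (cs.drop k) t = pvBd cs (k + t) := by
  unfold pvBd
  have h : ∀ m : Nat, (cs.drop k).getD m ' ' = cs.getD (k + m) ' ' := by
    intro m
    simp [List.getD_eq_getElem?_getD, List.getElem?_drop]
  rw [h t, h (t + 1), Nat.add_assoc]

lemma pvSpaces_eq (cs : List Char) :
    spacedA_spaces cs = (List.range (cs.length - 1)).filter (pvBd cs) := by
  unfold spacedA_spaces
  rw [show (fun (acc : List Nat) (i : Nat) =>
        let c1 := cs.getD i ' '
        let c2 := cs.getD (i + 1) ' '
        if PySem.Chars.islower c1 && PySem.Chars.isupper c2 then acc ++ [i] else acc)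
      = (fun acc i => if pvBd cs i then acc ++ [i] else acc) from rfl]
  rw [PySem.List.foldl_append_if_eq_filter]
  rfl

lemma pvBuild_eq_flatMap (cs : List Char) (sp : List Nat) :
    spacedA_build cs sp = (List.range sp.length).flatMap (pvSegS cs sp 0) := by
  unfold spacedA_build
  have hf : (fun (out : List Char) (i : Nat) =>
      let i0 := if i = 0 then 0 else sp.getD (i - 1) 0 + 1
      let i1 := sp.getD i 0 + 1
      let part := (cs.drop i0).take (i1 - i0)
      let out := out ++ part ++ [' ']
      if i = sp.length - 1 then out ++ cs.drop i1 else out)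
      = fun out i => out ++ pvSegS cs sp 0 i := by
    funext out i
    simp only [pvSegS]
    by_cases h : i = sp.length - 1 <;> simp [h, List.append_assoc]
  rw [hf, PySem.List.foldl_append_eq_flatMap]
  rfl

lemma pvFlatMap_eq_rec (cs : List Char) :
    ∀ (sp : List Nat) (s : Nat), sp ≠ [] →
      (List.range sp.length).flatMap (pvSegS cs sp s) = pvRec cs s sp := by
  intro sp
  induction sp with
  | nil => intro s h; exact absurd rfl h
  | cons j rest ih =>
      intro s _
      cases rest with
      | nil => simp [pvSegS, pvRec]
      | cons r rs =>
          have hlen : (j :: r :: rs : List Nat).length = (r :: rs).length + 1 := rfl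
          rw [hlen, List.range_succ_eq_map, List.flatMap_cons, List.flatMap_map]
          have hcomp : ∀ i ∈ List.range (r :: rs).length,
              pvSegS cs (j :: r :: rs) s (Nat.succ i) = pvSegS cs (r :: rs) (j + 1) i := by
            intro i hi
            simp only [List.mem_range] at hi
            have h1 : (Nat.succ i = (j :: r :: rs : List Nat).length - 1)
                = (i = (r :: rs : List Nat).length - 1) := by
              simp only [List.length_cons]
              apply propext
              omega
            cases i with
            | zero => simp only [pvSegS, h1]; rfl
            | succ m => simp only [pvSegS, h1]; rfl
          rw [pvFlatMap_congr _ _ _ hcomp, ih (j + 1) (by simp)]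
          have h0 : pvSegS cs (j :: r :: rs) s 0 = (cs.drop s).take (j + 1 - s) ++ [' '] := by
            simp [pvSegS]
          rw [h0]
          simp [pvRec, List.append_assoc]

lemma pvFilter_sorted_cons (L : List Nat) (hL : L.Pairwise (· < ·)) :
    ∀ (k j : Nat) (rest : List Nat),
      L.filter (fun x => k ≤ x) = j :: rest →
      rest = L.filter (fun x => j + 1 ≤ x) ∧ k ≤ j ∧ j ∈ L ∧
        ∀ m ∈ L, k ≤ m → m < j → False := by
  induction L with
  | nil => intro k j rest h; simp at h
  | cons a tl ih =>
      intro k j rest h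
      have hlt : ∀ x ∈ tl, a < x := (List.pairwise_cons.mp hL).1
      have htl : tl.Pairwise (· < ·) := (List.pairwise_cons.mp hL).2
      by_cases hka : k ≤ a
      · rw [List.filter_cons_of_pos (by simpa using hka)] at h
        obtain ⟨rfl, hrest⟩ := List.cons.inj h
        have hall : ∀ P : Nat → Prop, (∀ x ∈ tl, P x) → ∀ p : Nat → Bool,
            (∀ x, P x → p x = true) → tl.filter p = tl := by
          intro P hP p hp
          exact List.filter_eq_self.mpr fun x hx => hp x (hP x hx)
        have h1 : tl.filter (fun x => decide (k ≤ x)) = tl :=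
          hall (fun x => a < x) hlt _ fun x hx => by simp; omega
        have h2 : tl.filter (fun x => decide (a + 1 ≤ x)) = tl :=
          hall (fun x => a < x) hlt _ fun x hx => by simp; omega
        refine ⟨by rw [← hrest, h1, List.filter_cons_of_neg (by simp), h2], hka, by simp, ?_⟩
        intro m hm hkm hmj
        rcases List.mem_cons.mp hm with h' | h'
        · omega
        · exact absurd (hlt m h') (by omega)
      · rw [List.filter_cons_of_neg (by simpa using hka)] at h
        obtain ⟨h1, h2, h3, h4⟩ := ih htl k j rest h
        refine ⟨?_, h2, List.mem_cons_of_mem a h3, ?_⟩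
        · rw [h1, List.filter_cons_of_neg (by simp; omega)]
        · intro m hm hkm hmj
          rcases List.mem_cons.mp hm with h' | h'
          · omega
          · exact h4 m h' hkm hmj

lemma pvIns_cons_no (c : Char) (rest : List Char)
    (h : (PySem.Chars.islower c && PySem.Chars.isupper (rest.getD 0 ' ')) = false) :
    pvIns (c :: rest) = c :: pvIns rest := by
  cases rest with
  | nil => rfl
  | cons d r =>
      simp only [pvIns, pvTail, List.getD_cons_zero] at *
      rw [h]
      simp

lemma pvBd_cons_succ (c : Char) (rest : List Char) (t : Nat) :
    pvBd (c :: rest) (t + 1) = pvBd rest t := by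
  simp [pvBd]

lemma pvBd_cons_zero (c : Char) (rest : List Char) :
    pvBd (c :: rest) 0 = (PySem.Chars.islower c && PySem.Chars.isupper (rest.getD 0 ' ')) := by
  simp [pvBd]

lemma pvIns_no_bd (l : List Char) (h : ∀ t, pvBd l t = false) : pvIns l = l := by
  induction l with
  | nil => rfl
  | cons c rest ih =>
      rw [pvIns_cons_no c rest (by rw [← pvBd_cons_zero]; exact h 0)]
      rw [ih fun t => by rw [← pvBd_cons_succ c]; exact h (t + 1)]

lemma pvIns_split (t : Nat) : ∀ (l : List Char),
    pvBd l t = true → (∀ m, m < t → pvBd l m = false) →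
    pvIns l = l.take (t + 1) ++ ' ' :: pvIns (l.drop (t + 1)) := by
  induction t with
  | zero =>
      intro l h _
      match l, h with
      | [], h => rw [pvBd_false_of_ge _ _ (by simp)] at h; exact absurd h (by simp)
      | [c], h => rw [pvBd_false_of_ge _ _ (by simp)] at h; exact absurd h (by simp)
      | c :: d :: r, h =>
          rw [pvBd_cons_zero, List.getD_cons_zero] at h
          simp [pvIns, pvTail, h]
  | succ t ih =>
      intro l h hmin
      match l with
      | [] => rw [pvBd_false_of_ge _ _ (by simp)] at h; exact absurd h (by simp)
      | c :: rest =>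
          rw [pvBd_cons_succ] at h
          rw [pvIns_cons_no c rest (by rw [← pvBd_cons_zero]; exact hmin 0 (by omega))]
          rw [ih rest h fun m hm => by rw [← pvBd_cons_succ c]; exact hmin (m + 1) (by omega)]
          simp

lemma pvBFrom_mem (cs : List Char) (k i : Nat) (hk : k ≤ i) (hb : pvBd cs i = true) :
    i ∈ pvBFrom cs k := by
  unfold pvBFrom
  rw [List.mem_filter, List.mem_filter, List.mem_range]
  have := pvBd_lt cs i hb
  refine ⟨⟨by omega, hb⟩, by simpa using hk⟩

lemma pvBFrom_nil_bd (cs : List Char) (k : Nat) (h : pvBFrom cs k = []) :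
    ∀ t, pvBd (cs.drop k) t = false := by
  intro t
  rw [pvBd_drop]
  cases hb : pvBd cs (k + t) with
  | false => rfl
  | true =>
      exfalso
      have hmem := pvBFrom_mem cs k (k + t) (by omega) hb
      rw [h] at hmem
      simp at hmem

lemma pvRec_eq_ins (cs : List Char) :
    ∀ (n k : Nat), (pvBFrom cs k).length = n →
      pvRec cs k (pvBFrom cs k) = pvIns (cs.drop k) := by
  intro n
  induction n with
  | zero =>
      intro k hn
      have hnil : pvBFrom cs k = [] := List.length_eq_zero_iff.mp hn
      rw [hnil, pvIns_no_bd _ (pvBFrom_nil_bd cs k hnil)]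
      rfl
  | succ n ih =>
      intro k hn
      cases hsp : pvBFrom cs k with
      | nil => rw [hsp] at hn; simp at hn
      | cons j rest =>
          have hsorted : ((List.range (cs.length - 1)).filter (pvBd cs)).Pairwise (· < ·) :=
            List.Pairwise.filter _ (List.pairwise_lt_range)
          obtain ⟨hrest, hkj, hjmem, hmin⟩ :=
            pvFilter_sorted_cons _ hsorted k j rest hsp
          have hjb : pvBd cs j = true := (List.mem_filter.mp hjmem).2
          have hrest' : rest = pvBFrom cs (j + 1) := hrest
          have hb : pvBd (cs.drop k) (j - k) = true := by
            rw [pvBd_drop, show k + (j - k) = j from by omega]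
            exact hjb
          have hmin2 : ∀ m, m < j - k → pvBd (cs.drop k) m = false := by
            intro m hm
            rw [pvBd_drop]
            cases hc : pvBd cs (k + m) with
            | false => rfl
            | true =>
                exact absurd (hmin (k + m) (List.mem_filter.mp
                  (pvBFrom_mem cs 0 (k + m) (by omega) hc)).1 (by omega) (by omega)) (by simp)
          have hsplit := pvIns_split (j - k) (cs.drop k) hb hmin2
          have hlen : (pvBFrom cs (j + 1)).length = n := by
            have h' := hn
            rw [hsp] at h'
            rw [← hrest']
            simpa using h'
          rw [hsplit, pvRec, hrest', ih (j + 1) hlen]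
          rw [List.drop_drop, show k + (j - k + 1) = j + 1 from by omega,
            show j + 1 - k = j - k + 1 from by omega]

lemma pvAlt_fold (l : List Char) :
    ∀ (p : Char) (out : List Char),
      l.foldl spacedB_step (out, some p) = (out ++ pvTail p l, some (l.getLastD p)) := by
  induction l with
  | nil => intro p out; simp [pvTail]
  | cons c rest ih =>
      intro p out
      simp only [List.foldl_cons, spacedB_step, pvTail, List.getLastD_cons]
      rw [ih]
      by_cases h : (PySem.Chars.islower p && PySem.Chars.isupper c) = true <;>
        simp [h, List.append_assoc]

lemma pvAlt_eq_ins (lyrics : String) :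
    spaced_lyrics_alt lyrics = String.ofList (pvIns lyrics.toList) := by
  unfold spaced_lyrics_alt
  cases h : lyrics.toList with
  | nil => rfl
  | cons c rest =>
      simp only [List.foldl_cons, spacedB_step, pvIns]
      rw [show ((([] : List Char) ++ [c], some c) : List Char × Option Char) = ([c], some c) from rfl]
      rw [pvAlt_fold]
      rfl

-- ===== VERDICT (by name: the statement is the Claim_ definition above) =====
theorem spaced_lyrics_spec : Claim_equal_spaced_lyrics := by
  intro lyrics _
  unfold Spec_spaced_lyrics
  rw [pvAlt_eq_ins]
  unfold spaced_lyrics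
  have hsp : spacedA_spaces lyrics.toList = pvBFrom lyrics.toList 0 := by
    rw [pvSpaces_eq]
    unfold pvBFrom
    symm
    apply List.filter_eq_self.mpr
    intro x _
    exact decide_eq_true (Nat.zero_le x)
  by_cases h : (spacedA_spaces lyrics.toList).length > 0
  · rw [if_pos h]
    have hne : pvBFrom lyrics.toList 0 ≠ [] := by
      rw [← hsp]
      intro hh
      rw [hh] at h
      simp at h
    rw [pvBuild_eq_flatMap, hsp, pvFlatMap_eq_rec lyrics.toList _ 0 hne,
      pvRec_eq_ins lyrics.toList _ 0 rfl]
    simp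
  · rw [if_neg h]
    have hempty : pvBFrom lyrics.toList 0 = [] := by
      rw [← hsp]
      cases hx : spacedA_spaces lyrics.toList with
      | nil => rfl
      | cons a tl => rw [hx] at h; simp at h
    have hins : pvIns lyrics.toList = lyrics.toList := by
      rw [pvIns_no_bd _ (by simpa using pvBFrom_nil_bd lyrics.toList 0 hempty)]
    rw [hins]
    simp
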